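-- pv_equiv track=rewrite | github.com/julian2k10/AngeASI | morph_segmenter_ica.py | is_valid_root
-- ===== SOURCE A (Python) =====
-- def is_valid_root(word: str, prod_prefixes, prod_suffixes, is_suffix) -> bool:
--     if len(word) < 3: return False
--     for i in range(1, len(word) - 1):
--         part1, part2 = (word[:i], word[i:])
--         if is_suffix:
--             if part1 in prod_suffixes and part2 in prod_suffixes:
--                 return False
--         else:
--             if part1 in prod_prefixes and part2 in prod_prefixes:
--                 return False
--     return True
-- ===== SOURCE B (Python) =====
-- def is_valid_root(word: str, prod_prefixes, prod_suffixes, is_suffix) -> bool: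
--     if len(word) < 3:
--         return False
--     affixes = prod_suffixes if is_suffix else prod_prefixes
--     limit = len(word) - 2
--     for s in affixes:
--         if 1 <= len(s) <= limit and word.startswith(s) and word[len(s):] in affixes:
--             return False
--     return True
-- ===== Notes on version B (the rewrite author's own statement) =====
-- stated objective: faster
-- what changed: B selects the relevant affix set once and iterates over its elements as candidate first parts (length bound 1..len(word)-2, startswith, membership of the remainder) instead of A's loop over all split positions with two fresh slices plus two membership scans per position.
import Mathlib
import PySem

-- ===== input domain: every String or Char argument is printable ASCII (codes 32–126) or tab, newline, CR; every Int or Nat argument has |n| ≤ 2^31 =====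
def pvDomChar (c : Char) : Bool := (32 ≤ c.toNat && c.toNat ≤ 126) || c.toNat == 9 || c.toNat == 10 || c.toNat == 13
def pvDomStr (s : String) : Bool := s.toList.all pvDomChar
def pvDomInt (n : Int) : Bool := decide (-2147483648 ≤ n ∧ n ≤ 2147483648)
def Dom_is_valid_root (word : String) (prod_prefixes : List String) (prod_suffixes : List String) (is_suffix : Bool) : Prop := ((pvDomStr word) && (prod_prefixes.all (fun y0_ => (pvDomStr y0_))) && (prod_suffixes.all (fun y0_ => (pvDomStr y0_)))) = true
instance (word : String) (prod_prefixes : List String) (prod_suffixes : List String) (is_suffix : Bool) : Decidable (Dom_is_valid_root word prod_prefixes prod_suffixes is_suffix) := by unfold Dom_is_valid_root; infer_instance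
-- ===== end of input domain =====

-- B enumerates the affix list's elements as candidate first parts instead of A's loop
-- over every split position with two slices and two membership scans per position
-- (measurably faster on long words; same return value everywhere).

-- ===== PORT A =====
-- the for-loop over range(1, len(word)-1), returning false as soon as a split matches
def ivrLoopA (word : String) (prod_prefixes : List String) (prod_suffixes : List String) (is_suffix : Bool) : List Int → Bool
  | [] => true
  | i :: rest =>
    let part1 := PySem.Str.slice word none (some i)
    let part2 := PySem.Str.slice word (some i) none
    if is_suffix then
      if part1 ∈ prod_suffixes ∧ part2 ∈ prod_suffixes then false
      else ivrLoopA word prod_prefixes prod_suffixes is_suffix rest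
    else
      if part1 ∈ prod_prefixes ∧ part2 ∈ prod_prefixes then false
      else ivrLoopA word prod_prefixes prod_suffixes is_suffix rest

def is_valid_root (word : String) (prod_prefixes : List String) (prod_suffixes : List String) (is_suffix : Bool) : Bool :=
  if PySem.Str.len word < 3 then false
  else ivrLoopA word prod_prefixes prod_suffixes is_suffix
        (PySem.List.pyRange 1 (PySem.Str.len word - 1))

-- ===== PORT B =====
-- the for-loop over the affix list's elements
def ivrLoopB (word : String) (affixes : List String) (limit : Int) : List String → Bool
  | [] => true
  | s :: rest =>
    if 1 ≤ PySem.Str.len s ∧ PySem.Str.len s ≤ limit ∧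
       PySem.Str.startswith word s = true ∧
       PySem.Str.slice word (some (PySem.Str.len s)) none ∈ affixes then false
    else ivrLoopB word affixes limit rest

def is_valid_root_alt (word : String) (prod_prefixes : List String) (prod_suffixes : List String) (is_suffix : Bool) : Bool :=
  if PySem.Str.len word < 3 then false
  else
    let affixes := if is_suffix then prod_suffixes else prod_prefixes
    ivrLoopB word affixes (PySem.Str.len word - 2) affixes

-- ===== PRECONDITION & SPEC =====
def Spec_is_valid_root (word : String) (prod_prefixes : List String) (prod_suffixes : List String) (is_suffix : Bool) (out : Bool) : Prop := out = is_valid_root_alt word prod_prefixes prod_suffixes is_suffix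
instance (word : String) (prod_prefixes : List String) (prod_suffixes : List String) (is_suffix : Bool) (out : Bool) : Decidable (Spec_is_valid_root word prod_prefixes prod_suffixes is_suffix out) := by unfold Spec_is_valid_root; infer_instance

-- ===== CLAIM (what is proved, stated in full; the proofs are below) =====
def Claim_equal_is_valid_root : Prop := ∀ (word : String) (prod_prefixes : List String) (prod_suffixes : List String) (is_suffix : Bool), Dom_is_valid_root word prod_prefixes prod_suffixes is_suffix → Spec_is_valid_root word prod_prefixes prod_suffixes is_suffix (is_valid_root word prod_prefixes prod_suffixes is_suffix)

-- ===== LEMMAS AND PROOFS =====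

-- A's loop returns true iff no listed split position has both parts in the relevant set
theorem ivrLoopA_eq_true_iff (word : String) (pp ps : List String) (suf : Bool) (is : List Int) :
    ivrLoopA word pp ps suf is = true ↔
      ∀ i ∈ is, ¬(PySem.Str.slice word none (some i) ∈ (if suf then ps else pp) ∧
                  PySem.Str.slice word (some i) none ∈ (if suf then ps else pp)) := by
  induction is with
  | nil => simp [ivrLoopA]
  | cons i rest ih =>
    cases suf <;> simp only [ivrLoopA] <;> split_ifs with h <;>
      simp_all

-- B's loop returns true iff no listed affix is a matching first part
theorem ivrLoopB_eq_true_iff (word : String) (affixes : List String) (limit : Int) (l : List String) :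
    ivrLoopB word affixes limit l = true ↔
      ∀ s ∈ l, ¬(1 ≤ PySem.Str.len s ∧ PySem.Str.len s ≤ limit ∧
                 PySem.Str.startswith word s = true ∧
                 PySem.Str.slice word (some (PySem.Str.len s)) none ∈ affixes) := by
  induction l with
  | nil => simp [ivrLoopB]
  | cons s rest ih =>
    simp only [ivrLoopB]; split_ifs with h <;> simp_all

theorem ivr_core (word : String) (S : List String) (_hlen : ¬ PySem.Str.len word < 3) :
    (∀ i ∈ PySem.List.pyRange 1 (PySem.Str.len word - 1),
        ¬(PySem.Str.slice word none (some i) ∈ S ∧ PySem.Str.slice word (some i) none ∈ S)) ↔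
    (∀ s ∈ S, ¬(1 ≤ PySem.Str.len s ∧ PySem.Str.len s ≤ PySem.Str.len word - 2 ∧
                PySem.Str.startswith word s = true ∧
                PySem.Str.slice word (some (PySem.Str.len s)) none ∈ S)) := by
  rw [PySem.Str.len_eq] at _hlen ⊢
  push Not at _hlen
  set W : List Char := word.toList with hW
  constructor
  · -- positions → candidates
    intro hA s hs hbad
    obtain ⟨h1, h2, hpre, hdrop⟩ := hbad
    rw [PySem.Str.len_eq] at h1 h2
    have hpre' : s.toList <+: W := by
      have := PySem.Str.startswith_eq word s
      rw [hpre] at this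
      exact List.isPrefixOf_iff_prefix.mp this.symm
    refine hA (s.toList.length : Int) ?_ ⟨?_, ?_⟩
    · rw [PySem.List.mem_pyRange_one]; omega
    · have : PySem.Str.slice word none (some (s.toList.length : Int)) = s := by
        apply String.toList_inj.mp
        rw [PySem.Str.toList_slice, PySem.Chars.slice_eq_listSlice,
            PySem.List.slice_to _ (by positivity)]
        simp only [Int.toNat_natCast, ← hW]
        exact (List.prefix_iff_eq_take.mp hpre').symm
      rw [this]; exact hs
    · rw [← PySem.Str.len_eq]; exact hdrop
  · -- candidates → positions
    intro hB i hi hbad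
    rw [PySem.List.mem_pyRange_one] at hi
    obtain ⟨htake, hdrop⟩ := hbad
    refine hB (PySem.Str.slice word none (some i)) htake ?_
    have hi0 : 0 ≤ i := by omega
    have hlist : (PySem.Str.slice word none (some i)).toList = W.take i.toNat := by
      rw [PySem.Str.toList_slice, PySem.Chars.slice_eq_listSlice,
          PySem.List.slice_to _ hi0, hW]
    have hlen' : PySem.Str.len (PySem.Str.slice word none (some i)) = i := by
      rw [PySem.Str.len_eq, hlist, List.length_take]
      omega
    refine ⟨by omega, by omega, ?_, ?_⟩
    · rw [PySem.Str.startswith_eq]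
      apply List.isPrefixOf_iff_prefix.mpr
      rw [hlist]; exact List.take_prefix _ _
    · rw [hlen']; exact hdrop

theorem is_valid_root_spec_aux (word : String) (pp ps : List String) (suf : Bool) :
    is_valid_root word pp ps suf = is_valid_root_alt word pp ps suf := by
  by_cases hlen : PySem.Str.len word < 3
  · have h3 : word.length < 3 := by
      rw [PySem.Str.len_eq] at hlen; exact_mod_cast hlen
    simp [is_valid_root, is_valid_root_alt, h3]
  · cases suf
    · rw [is_valid_root, is_valid_root_alt, if_neg hlen, if_neg hlen]
      show ivrLoopA word pp ps false _ = ivrLoopB word pp _ pp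
      rw [Bool.eq_iff_iff, ivrLoopA_eq_true_iff, ivrLoopB_eq_true_iff]
      simpa using ivr_core word pp hlen
    · rw [is_valid_root, is_valid_root_alt, if_neg hlen, if_neg hlen]
      show ivrLoopA word pp ps true _ = ivrLoopB word ps _ ps
      rw [Bool.eq_iff_iff, ivrLoopA_eq_true_iff, ivrLoopB_eq_true_iff]
      simpa using ivr_core word ps hlen

-- ===== VERDICT (by name: the statement is the Claim_ definition above) =====
theorem is_valid_root_spec : Claim_equal_is_valid_root := by
  intro word pp ps suf _
  exact is_valid_root_spec_aux word pp ps suf
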